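-- pv_equiv track=rewrite | github.com/saoki0913/career_compass | backend/tests/company_info/integration/test_live_selection_schedule_report.py | _selection_schedule_outcome
-- ===== SOURCE A (Python) =====
-- def _selection_schedule_outcome(reasons: list[str]) -> tuple[str, str, str]:
--     """Return (status, severity, failureKind) aligned with company_info_search / conversation reports."""
--     if not reasons:
--         return "passed", "passed", "none"
--     reason_set = set(reasons)
--     if reason_set <= {"confidence_low_only"}:
--         return "passed", "degraded", "quality"
--     has_infra = bool(reason_set & {"search_candidate_missing", "schedule_fetch_failed"}) or any(
--         r.startswith("exception:") for r in reasons
--     )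
--     if has_infra:
--         return "failed", "failed", "infra"
--     return "failed", "failed", "quality"
-- ===== SOURCE B (Python) =====
-- def _rank(r: str) -> int:
--     """Severity rank of a single reason: 1 quality-degraded-only, 3 infra, 2 other quality failure."""
--     if r == "confidence_low_only":
--         return 1
--     if r in ("search_candidate_missing", "schedule_fetch_failed") or r.startswith("exception:"):
--         return 3
--     return 2
--
--
-- def _selection_schedule_outcome(reasons: list[str]) -> tuple[str, str, str]:
--     """Return (status, severity, failureKind) aligned with company_info_search / conversation reports."""
--     level = max(map(_rank, reasons), default=0)
--     if level == 0:
--         return "passed", "passed", "none"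
--     if level == 1:
--         return "passed", "degraded", "quality"
--     if level == 3:
--         return "failed", "failed", "infra"
--     return "failed", "failed", "quality"
-- ===== Notes on version B (the rewrite author's own statement) =====
-- stated objective: alternative
-- what changed: B maps each reason to a numeric severity rank (1 low-confidence, 3 infra, 2 other) and classifies by the maximum rank (0 for empty), instead of A's set construction, subset test, intersection and any() scan.
import Mathlib
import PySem

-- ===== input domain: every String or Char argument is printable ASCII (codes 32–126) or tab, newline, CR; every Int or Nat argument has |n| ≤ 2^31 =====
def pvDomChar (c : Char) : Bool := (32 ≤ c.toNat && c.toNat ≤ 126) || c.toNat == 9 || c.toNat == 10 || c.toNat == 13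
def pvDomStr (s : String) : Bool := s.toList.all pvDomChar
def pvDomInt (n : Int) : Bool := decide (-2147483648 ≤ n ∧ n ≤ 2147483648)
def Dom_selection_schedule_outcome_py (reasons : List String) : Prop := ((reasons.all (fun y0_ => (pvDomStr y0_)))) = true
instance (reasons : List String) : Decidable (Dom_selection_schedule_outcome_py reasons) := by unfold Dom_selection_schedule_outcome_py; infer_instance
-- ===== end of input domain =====

-- B classifies by the maximum of a per-reason numeric severity rank instead of A's set algebra; objective: alternative.

-- ===== PORT A =====
def selection_schedule_outcome_py (reasons : List String) : String × String × String :=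
  if reasons = [] then ("passed", "passed", "none")
  else
    let reason_set : PySem.Set String := PySem.Set.ofList reasons
    if PySem.Set.issubset reason_set ["confidence_low_only"] then
      ("passed", "degraded", "quality")
    else
      -- bool(reason_set & {...}) = the intersection is nonempty
      if (PySem.Set.inter reason_set ["search_candidate_missing", "schedule_fetch_failed"] ≠ []) ∨
         reasons.any (fun r => PySem.Str.startswith r "exception:") then
        ("failed", "failed", "infra")
      else ("failed", "failed", "quality")

-- ===== PORT B =====
-- severity rank of a single reason
def pvRank (r : String) : Int :=
  if r = "confidence_low_only" then 1
  else if r = "search_candidate_missing" ∨ r = "schedule_fetch_failed" ∨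
          PySem.Str.startswith r "exception:" then 3
  else 2

def selection_schedule_outcome_py_alt (reasons : List String) : String × String × String :=
  -- level = max(map(_rank, reasons), default=0)
  let level : Int := (reasons.map pvRank).foldl max 0
  if level = 0 then ("passed", "passed", "none")
  else if level = 1 then ("passed", "degraded", "quality")
  else if level = 3 then ("failed", "failed", "infra")
  else ("failed", "failed", "quality")

-- ===== PRECONDITION & SPEC =====
def Spec_selection_schedule_outcome_py (reasons : List String) (out : String × String × String) : Prop := out = selection_schedule_outcome_py_alt reasons
instance (reasons : List String) (out : String × String × String) : Decidable (Spec_selection_schedule_outcome_py reasons out) := by unfold Spec_selection_schedule_outcome_py; infer_instance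

-- ===== CLAIM (what is proved, stated in full; the proofs are below) =====
def Claim_equal_selection_schedule_outcome_py : Prop := ∀ (reasons : List String), Dom_selection_schedule_outcome_py reasons → Spec_selection_schedule_outcome_py reasons (selection_schedule_outcome_py reasons)

-- ===== LEMMAS AND PROOFS =====

theorem pvRank_ge_one (r : String) : 1 ≤ pvRank r := by
  unfold pvRank; split_ifs <;> omega

theorem pvRank_le_three (r : String) : pvRank r ≤ 3 := by
  unfold pvRank; split_ifs <;> omega

theorem le_fold_max (l : List Int) (b : Int) : b ≤ l.foldl max b := by
  induction l generalizing b with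
  | nil => simp
  | cons x xs ih => exact le_trans (le_max_left b x) (ih (max b x))

theorem fold_max_cases (l : List Int) (b : Int) :
    l.foldl max b = b ∨ ∃ x ∈ l, l.foldl max b = x := by
  induction l generalizing b with
  | nil => left; rfl
  | cons x xs ih =>
      rcases ih (max b x) with h | ⟨y, hy, hey⟩
      · rcases max_cases b x with ⟨he, _⟩ | ⟨he, _⟩
        · left; simpa [List.foldl, he] using h
        · right; exact ⟨x, List.mem_cons_self, by simpa [List.foldl, he] using h⟩
      · right; exact ⟨y, List.mem_cons_of_mem _ hy, hey⟩

theorem mem_le_fold_max (l : List Int) (b : Int) (x : Int) (hx : x ∈ l) :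
    x ≤ l.foldl max b := by
  induction l generalizing b with
  | nil => cases hx
  | cons y ys ih =>
      rcases List.mem_cons.mp hx with rfl | h
      · exact le_trans (le_max_right b x) (le_fold_max ys (max b x))
      · simpa [List.foldl] using ih (max b y) h

theorem pvRank_eq_three_iff (r : String) :
    pvRank r = 3 ↔ (r = "search_candidate_missing" ∨ r = "schedule_fetch_failed" ∨
      PySem.Str.startswith r "exception:" = true) := by
  unfold pvRank
  split_ifs with h1 h2
  · subst h1
    exact iff_of_false (by omega) (by decide)
  · exact iff_of_true rfl h2
  · exact iff_of_false (by omega) h2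

theorem pvRank_eq_one_iff (r : String) : pvRank r = 1 ↔ r = "confidence_low_only" := by
  unfold pvRank; split_ifs with h1 h2
  · exact iff_of_true rfl h1
  · exact iff_of_false (by omega) h1
  · exact iff_of_false (by omega) h1

theorem subset_iff_all (reasons : List String) :
    PySem.Set.issubset (PySem.Set.ofList reasons) ["confidence_low_only"] =
      reasons.all (fun r => r == "confidence_low_only") := by
  rcases h : reasons.all (fun r => r == "confidence_low_only") with _ | _
  · rw [List.all_eq_false] at h
    obtain ⟨x, hx, hne⟩ := h
    rw [beq_iff_eq] at hne
    simp only [Bool.eq_false_iff, ne_eq]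
    intro hsub
    rw [PySem.Set.issubset_iff] at hsub
    have := hsub x (by rw [PySem.Set.mem_ofList]; exact hx)
    simp at this
    exact hne this
  · rw [PySem.Set.issubset_iff]
    intro x hx
    rw [PySem.Set.mem_ofList] at hx
    simp only [List.all_eq_true, beq_iff_eq] at h
    simp [h x hx]

theorem infra_iff (reasons : List String) :
    ((PySem.Set.inter (PySem.Set.ofList reasons)
        ["search_candidate_missing", "schedule_fetch_failed"] ≠ []) ∨
      reasons.any (fun r => PySem.Str.startswith r "exception:") = true) ↔
    ∃ x ∈ reasons, pvRank x = 3 := by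
  rw [← List.isEmpty_eq_false_iff, List.isEmpty_eq_false_iff_exists_mem]
  simp only [List.any_eq_true, pvRank_eq_three_iff]
  constructor
  · rintro (⟨x, hx⟩ | ⟨x, hx, hsw⟩)
    · rw [PySem.Set.mem_inter, PySem.Set.mem_ofList] at hx
      obtain ⟨hx1, hx2⟩ := hx
      refine ⟨x, hx1, ?_⟩
      simp only [List.mem_cons, List.not_mem_nil, or_false] at hx2
      tauto
    · exact ⟨x, hx, Or.inr (Or.inr hsw)⟩
  · rintro ⟨x, hx, h | h | h⟩
    · exact Or.inl ⟨x, by rw [PySem.Set.mem_inter, PySem.Set.mem_ofList]; exact ⟨hx, by simp [h]⟩⟩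
    · exact Or.inl ⟨x, by rw [PySem.Set.mem_inter, PySem.Set.mem_ofList]; exact ⟨hx, by simp [h]⟩⟩
    · exact Or.inr ⟨x, hx, h⟩

-- characterisations of the maximum rank level
theorem level_pos_of_ne_nil (reasons : List String) (h : reasons ≠ []) :
    1 ≤ (reasons.map pvRank).foldl max 0 := by
  obtain ⟨x, hx⟩ := List.exists_mem_of_ne_nil reasons h
  exact le_trans (pvRank_ge_one x)
    (mem_le_fold_max _ 0 _ (List.mem_map_of_mem hx))

theorem level_eq_one_iff (reasons : List String) (h : reasons ≠ []) :
    (reasons.map pvRank).foldl max 0 = 1 ↔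
      reasons.all (fun r => r == "confidence_low_only") = true := by
  constructor
  · intro hl
    rw [List.all_eq_true]
    intro x hx
    have h1 := pvRank_ge_one x
    have h2 := mem_le_fold_max _ 0 _ (List.mem_map_of_mem hx (f := pvRank))
    rw [hl] at h2
    rw [beq_iff_eq, ← pvRank_eq_one_iff]
    omega
  · intro hall
    rw [List.all_eq_true] at hall
    have hle : (reasons.map pvRank).foldl max 0 ≤ 1 := by
      rcases fold_max_cases (reasons.map pvRank) 0 with he | ⟨y, hy, hey⟩
      · omega
      · obtain ⟨x, hx, rfl⟩ := List.mem_map.mp hy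
        have := (pvRank_eq_one_iff x).mpr (beq_iff_eq.mp (hall x hx))
        omega
    have := level_pos_of_ne_nil reasons h
    omega

theorem level_eq_three_iff (reasons : List String) :
    (reasons.map pvRank).foldl max 0 = 3 ↔ ∃ x ∈ reasons, pvRank x = 3 := by
  constructor
  · intro hl
    rcases fold_max_cases (reasons.map pvRank) 0 with he | ⟨y, hy, hey⟩
    · omega
    · obtain ⟨x, hx, rfl⟩ := List.mem_map.mp hy
      exact ⟨x, hx, by omega⟩
  · rintro ⟨x, hx, hx3⟩
    have h2 := mem_le_fold_max _ 0 _ (List.mem_map_of_mem hx (f := pvRank))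
    have hle : (reasons.map pvRank).foldl max 0 ≤ 3 := by
      rcases fold_max_cases (reasons.map pvRank) 0 with he | ⟨y, hy, hey⟩
      · omega
      · obtain ⟨z, hz, rfl⟩ := List.mem_map.mp hy
        have := pvRank_le_three z
        omega
    omega

-- ===== VERDICT (by name: the statement is the Claim_ definition above) =====
theorem selection_schedule_outcome_py_spec : Claim_equal_selection_schedule_outcome_py := by
  intro reasons _
  unfold Spec_selection_schedule_outcome_py selection_schedule_outcome_py selection_schedule_outcome_py_alt
  by_cases hnil : reasons = []
  · simp [hnil]
  · have h1 := level_pos_of_ne_nil reasons hnil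
    simp only [hnil, if_false]
    rw [subset_iff_all]
    rw [if_neg (by omega : ¬ (reasons.map pvRank).foldl max 0 = 0)]
    rcases hall : reasons.all (fun r => r == "confidence_low_only") with _ | _
    · have hne1 : ¬ (reasons.map pvRank).foldl max 0 = 1 := by
        rw [level_eq_one_iff reasons hnil]; simp [hall]
      simp only [Bool.false_eq_true, if_false, if_neg hne1]
      by_cases hinf : ∃ x ∈ reasons, pvRank x = 3
      · rw [if_pos ((infra_iff reasons).mpr hinf),
            if_pos ((level_eq_three_iff reasons).mpr hinf)]
      · rw [if_neg (fun h => hinf ((infra_iff reasons).mp h)),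
            if_neg (fun h => hinf ((level_eq_three_iff reasons).mp h))]
    · rw [if_pos rfl, if_pos ((level_eq_one_iff reasons hnil).mpr hall)]
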